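-- pv_equiv track=rewrite | github.com/LetitiaHo/Movie-Project | 10_disambiguation7.py | get_sentence
-- ===== SOURCE A (Python) =====
-- def get_sentence(text, index):
--     """ Input index of a word in text, return the 10 words before and after """
--     sentence = []
--     sentence.append(text[index][0])
--
--     for i in range(1, 10):
--         if index + i < len(text) and index - i >= 0:
--             if text[index + i] != ['-']:
--                 word = text[index + i][0]
--                 sentence.append(word)
--             if text[index - i] != ['-']:
--                 word = text[index - i][0]
--                 sentence.insert(0, word)
--
--     return ' '.join(sentence)
-- ===== SOURCE B (Python) =====
-- def get_sentence(text, index):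
--     """ Input index of a word in text, return the 10 words before and after """
--     n = len(text)
--     m = min(9, index, n - 1 - index)
--     if m < 0:
--         m = 0
--     words = []
--     for j in range(index - m, index + m + 1):
--         if j == index:
--             words.append(text[index][0])
--         elif text[j] != ['-']:
--             words.append(text[j][0])
--     return ' '.join(words)
-- ===== Notes on version B (the rewrite author's own statement) =====
-- stated objective: simpler
-- what changed: Replaced the two-ended grow loop (append-right / insert-at-0-left under a coupled boundary guard, 9 fixed iterations) by computing the symmetric window radius m = min(9, index, len(text)-1-index) clamped to 0 up front and building the sentence in one left-to-right scan over range(index-m, index+m+1).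
import Mathlib
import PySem

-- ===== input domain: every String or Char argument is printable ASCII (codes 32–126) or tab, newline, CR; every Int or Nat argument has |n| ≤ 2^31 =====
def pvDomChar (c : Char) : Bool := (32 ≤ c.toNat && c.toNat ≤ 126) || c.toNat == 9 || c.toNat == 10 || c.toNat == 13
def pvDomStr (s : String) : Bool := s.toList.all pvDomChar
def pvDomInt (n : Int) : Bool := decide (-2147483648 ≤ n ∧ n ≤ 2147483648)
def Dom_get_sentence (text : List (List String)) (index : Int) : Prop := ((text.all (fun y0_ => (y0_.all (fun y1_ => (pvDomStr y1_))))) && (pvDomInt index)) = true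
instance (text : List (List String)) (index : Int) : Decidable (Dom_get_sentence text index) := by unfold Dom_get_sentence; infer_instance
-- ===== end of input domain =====

-- B replaces A's two-ended grow loop by a precomputed symmetric radius and one left-to-right
-- scan over the window (objective: simpler).

-- text[j][0] (shared transliteration of the indexing expression both Pythons write)
def pvWordAt (text : List (List String)) (j : Int) : String :=
  ((PySem.List.pyGet? text j).bind (fun w => PySem.List.pyGet? w 0)).getD ""

-- ===== PORT A =====
-- the body of A's 'for i in range(1, 10)' loop
def pvStepA (text : List (List String)) (index : Int) (s : List String) (i : Int) : List String :=
  if index + i < (text.length : Int) ∧ 0 ≤ index - i then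
    let s := if (PySem.List.pyGet? text (index + i)).getD [] ≠ ["-"] then
               s ++ [pvWordAt text (index + i)] else s
    let s := if (PySem.List.pyGet? text (index - i)).getD [] ≠ ["-"] then
               pvWordAt text (index - i) :: s else s
    s
  else s

def get_sentence (text : List (List String)) (index : Int) : String :=
  let sentence : List String := [pvWordAt text index]
  let sentence := (PySem.List.pyRange 1 10 1).foldl (pvStepA text index) sentence
  PySem.Str.join " " sentence

-- ===== PORT B =====
def get_sentence_alt (text : List (List String)) (index : Int) : String :=
  let n : Int := text.length
  let m : Int := min 9 (min index (n - 1 - index))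
  let m : Int := if m < 0 then 0 else m
  let words := (PySem.List.pyRange (index - m) (index + m + 1) 1).foldl (fun ws j =>
    if j = index then ws ++ [pvWordAt text index]
    else if (PySem.List.pyGet? text j).getD [] ≠ ["-"] then ws ++ [pvWordAt text j]
    else ws) []
  PySem.Str.join " " words

-- ===== PRECONDITION & SPEC =====
-- Pre_ excludes exactly the inputs where the Python A raises an IndexError: index out of
-- range(-len..len-1), or some accessed window entry is the empty inner list.
def Pre_get_sentence (text : List (List String)) (index : Int) : Prop :=
  -(text.length : Int) ≤ index ∧ index < (text.length : Int) ∧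
  ∀ j ∈ PySem.List.pyRange
      (index - max (min 9 (min index ((text.length : Int) - 1 - index))) 0)
      (index + max (min 9 (min index ((text.length : Int) - 1 - index))) 0 + 1) 1,
    PySem.List.pyGet? text j ≠ some ([] : List String)
instance (text : List (List String)) (index : Int) : Decidable (Pre_get_sentence text index) := by
  unfold Pre_get_sentence; infer_instance

def pvWitness_get_sentence : List (List String) × Int := ([["a"], ["-"], ["c"]], 1)

def Spec_get_sentence (text : List (List String)) (index : Int) (out : String) : Prop := out = get_sentence_alt text index
instance (text : List (List String)) (index : Int) (out : String) : Decidable (Spec_get_sentence text index out) := by unfold Spec_get_sentence; infer_instance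

-- ===== CLAIM (what is proved, stated in full; the proofs are below) =====
def Claim_equal_get_sentence : Prop := ∀ (text : List (List String)) (index : Int), Dom_get_sentence text index → Pre_get_sentence text index → Spec_get_sentence text index (get_sentence text index)

-- ===== LEMMAS AND PROOFS =====

-- the conditionally-kept word at index j (the common 'if text[j] != ['-']' shape)
def pvF (text : List (List String)) (j : Int) : List String :=
  if (PySem.List.pyGet? text j).getD [] ≠ ["-"] then [pvWordAt text j] else []

lemma pvFoldl_id {α β : Type} (l : List β) (init : α) :
    l.foldl (fun s _ => s) init = init := by
  induction l generalizing init with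
  | nil => rfl
  | cons x xs ih => simp only [List.foldl_cons]; exact ih init

lemma pvStepA_true (text : List (List String)) (index : Int) (L R : List String) (c : String)
    (i : Int) (h : index + i < (text.length : Int) ∧ 0 ≤ index - i) :
    pvStepA text index (L ++ [c] ++ R) i =
      (pvF text (index - i) ++ L) ++ [c] ++ (R ++ pvF text (index + i)) := by
  unfold pvStepA pvF
  rw [if_pos h]
  split_ifs <;> simp

lemma pvStepA_false (text : List (List String)) (index : Int) (s : List String)
    (i : Int) (h : ¬ (index + i < (text.length : Int) ∧ 0 ≤ index - i)) :
    pvStepA text index s i = s := by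
  unfold pvStepA
  rw [if_neg h]

-- loop invariant for A: after the first k effective iterations the sentence is
-- left window ++ [center] ++ right window
lemma pvA_inv (text : List (List String)) (index : Int) (m : Int)
    (hm : m = max (min 9 (min index ((text.length : Int) - 1 - index))) 0)
    (k : Nat) (hk : (k : Int) ≤ m) :
    (PySem.List.pyRange 1 (1 + k) 1).foldl (pvStepA text index) [pvWordAt text index] =
      (PySem.List.pyRange (index - k) index 1).flatMap (pvF text) ++ [pvWordAt text index] ++
      (PySem.List.pyRange (index + 1) (index + 1 + k) 1).flatMap (pvF text) := by
  induction k with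
  | zero =>
      rw [PySem.List.pyRange_one_eq_nil (by omega), PySem.List.pyRange_one_eq_nil (by omega),
        PySem.List.pyRange_one_eq_nil (by omega)]
      simp
  | succ k ih =>
      have hk' : (k : Int) ≤ m := by push_cast at hk; omega
      rw [show ((1 : Int) + ((k + 1 : Nat) : Int)) = (1 + (k : Int)) + 1 from by push_cast; ring,
        PySem.List.pyRange_one_succ_right (by omega), List.foldl_append]
      simp only [List.foldl_cons, List.foldl_nil]
      rw [ih hk']
      have hguard : index + (1 + (k : Int)) < (text.length : Int) ∧ 0 ≤ index - (1 + (k : Int)) := by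
        push_cast at hk; omega
      rw [pvStepA_true text index _ _ _ _ hguard]
      rw [show (index - ((k + 1 : Nat) : Int)) = index - (1 + (k : Int)) from by push_cast; ring,
        show (index + 1 + ((k + 1 : Nat) : Int)) = (index + 1 + (k : Int)) + 1 from by push_cast; ring,
        PySem.List.pyRange_one_cons (show index - (1 + (k : Int)) < index by omega),
        show index - (1 + (k : Int)) + 1 = index - (k : Int) from by ring,
        PySem.List.pyRange_one_succ_right (show index + 1 ≤ index + 1 + (k : Int) by omega)]
      simp only [List.flatMap_cons, List.flatMap_append, List.flatMap_nil]
      rw [show index + (1 + (k : Int)) = index + 1 + (k : Int) from by ring]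
      simp [List.append_assoc]

-- A's full loop: iterations past the radius leave the state unchanged
lemma pvA_loop (text : List (List String)) (index : Int) (m : Int)
    (hm : m = max (min 9 (min index ((text.length : Int) - 1 - index))) 0) :
    (PySem.List.pyRange 1 10 1).foldl (pvStepA text index) [pvWordAt text index] =
      (PySem.List.pyRange (index - m) index 1).flatMap (pvF text) ++ [pvWordAt text index] ++
      (PySem.List.pyRange (index + 1) (index + 1 + m) 1).flatMap (pvF text) := by
  have hm0 : 0 ≤ m := by omega
  have hm9 : m ≤ 9 := by omega
  rw [PySem.List.pyRange_one_append 1 (1 + m) 10 (by omega) (by omega), List.foldl_append]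
  have htail : ∀ (s : List String),
      (PySem.List.pyRange (1 + m) 10 1).foldl (pvStepA text index) s = s := by
    intro s
    have h := PySem.List.foldl_congr_mem (PySem.List.pyRange (1 + m) 10 1)
      (pvStepA text index) (fun s _ => s) s
      (by intro acc x hx; rw [PySem.List.mem_pyRange_one] at hx
          exact pvStepA_false text index acc x (by omega))
    rw [h, pvFoldl_id]
  rw [htail]
  have hmk : m = ((m.toNat : Nat) : Int) := by omega
  rw [hmk] at hm ⊢
  exact pvA_inv text index _ hm m.toNat (by omega)
-- B's scan equals the same three-part decomposition
lemma pvB_scan (text : List (List String)) (index : Int) (m : Int) (hm0 : 0 ≤ m) :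
    (PySem.List.pyRange (index - m) (index + m + 1) 1).foldl (fun ws j =>
        if j = index then ws ++ [pvWordAt text index]
        else if (PySem.List.pyGet? text j).getD [] ≠ ["-"] then ws ++ [pvWordAt text j]
        else ws) [] =
      (PySem.List.pyRange (index - m) index 1).flatMap (pvF text) ++ [pvWordAt text index] ++
      (PySem.List.pyRange (index + 1) (index + m + 1) 1).flatMap (pvF text) := by
  have hstep : (fun (ws : List String) (j : Int) =>
        if j = index then ws ++ [pvWordAt text index]
        else if (PySem.List.pyGet? text j).getD [] ≠ ["-"] then ws ++ [pvWordAt text j]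
        else ws) =
      fun ws j => ws ++ (if j = index then [pvWordAt text index] else pvF text j) := by
    funext ws j
    unfold pvF
    split_ifs <;> simp
  rw [hstep, PySem.List.foldl_append_eq_flatMap]
  rw [PySem.List.pyRange_one_append (index - m) index (index + m + 1) (by omega) (by omega),
    PySem.List.pyRange_one_append index (index + 1) (index + m + 1) (by omega) (by omega),
    PySem.List.pyRange_one_singleton]
  simp only [List.nil_append, List.flatMap_append, List.flatMap_cons, List.flatMap_nil,
    List.append_nil]
  have hLeft : (PySem.List.pyRange (index - m) index 1).flatMap
      (fun j => if j = index then [pvWordAt text index] else pvF text j) =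
      (PySem.List.pyRange (index - m) index 1).flatMap (pvF text) := by
    apply List.flatMap_congr
    intro j hj
    rw [PySem.List.mem_pyRange_one] at hj
    rw [if_neg (by omega)]
  have hRight : (PySem.List.pyRange (index + 1) (index + m + 1) 1).flatMap
      (fun j => if j = index then [pvWordAt text index] else pvF text j) =
      (PySem.List.pyRange (index + 1) (index + m + 1) 1).flatMap (pvF text) := by
    apply List.flatMap_congr
    intro j hj
    rw [PySem.List.mem_pyRange_one] at hj
    rw [if_neg (by omega)]
  rw [hLeft, hRight]
  simp [List.append_assoc]

-- ===== VERDICT (by name: the statement is the Claim_ definition above) =====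
theorem get_sentence_spec : Claim_equal_get_sentence := by
  intro text index _hdom _hpre
  unfold Spec_get_sentence get_sentence get_sentence_alt
  have hm : (if min 9 (min index ((text.length : Int) - 1 - index)) < 0 then 0
      else min 9 (min index ((text.length : Int) - 1 - index))) =
      max (min 9 (min index ((text.length : Int) - 1 - index))) 0 := by
    split_ifs <;> omega
  simp only
  rw [hm, pvA_loop text index _ rfl, pvB_scan text index _ (by omega)]
  have : index + 1 + max (min 9 (min index ((text.length : Int) - 1 - index))) 0 =
      index + max (min 9 (min index ((text.length : Int) - 1 - index))) 0 + 1 := by ring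
  rw [this]
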